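-- pv_equiv track=rewrite | github.com/WarmMilkCodes/LoLBot | cogs/salaries.py | get_highest_rank
-- ===== SOURCE A (Python) =====
-- RANK_ORDER = {
--     "IRON": 1,
--     "BRONZE": 2,
--     "SILVER": 3,
--     "GOLD": 4,
--     "PLATINUM": 5,
--     "EMERALD": 6,
--     "DIAMOND": 7,
--     "MASTER": 8,
--     "GRANDMASTER": 9,
--     "CHALLENGER": 10
-- }
--
-- DIVISION_ORDER = {
--     'IV': 0,
--     'III': 10,
--     'II': 20,
--     'I': 30
-- }
--
-- def get_highest_rank(rank_info, historical_rank_info):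
--     """Determine the highest rank a player has from current and historical data"""
--     highest_rank = None
--     highest_division = None
--
--     # Check current rank_info
--     for rank_entry in rank_info:
--         if rank_entry['queue_type'] == "RANKED_SOLO_5x5":
--             rank = rank_entry.get('tier')
--             division = rank_entry.get('division')
--             if highest_rank is None or (RANK_ORDER[rank] > RANK_ORDER[highest_rank]) or (RANK_ORDER[rank] == RANK_ORDER[highest_rank] and DIVISION_ORDER[division] > DIVISION_ORDER[highest_division]):
--                 highest_rank = rank
--                 highest_division = division
--
--
--     return highest_rank, highest_division
-- ===== SOURCE B (Python) =====
-- TIER_LADDER = ["CHALLENGER", "GRANDMASTER", "MASTER", "DIAMOND", "EMERALD",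
--                "PLATINUM", "GOLD", "SILVER", "BRONZE", "IRON"]
-- DIVISION_LADDER = ["I", "II", "III", "IV"]
--
-- def get_highest_rank(rank_info, historical_rank_info):
--     """Determine the highest rank a player has from current and historical data"""
--     present = {(e.get('tier'), e.get('division'))
--                for e in rank_info if e['queue_type'] == "RANKED_SOLO_5x5"}
--     for tier in TIER_LADDER:
--         for division in DIVISION_LADDER:
--             if (tier, division) in present:
--                 return tier, division
--     return None, None
-- ===== Notes on version B (the rewrite author's own statement) =====
-- stated objective: alternative
-- what changed: Instead of scanning entries and keeping a running maximum, B collects the set of (tier, division) pairs present among solo-queue entries and then walks the fixed rank ladder from CHALLENGER I downward, returning the first ladder cell that is present.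
import Mathlib
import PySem

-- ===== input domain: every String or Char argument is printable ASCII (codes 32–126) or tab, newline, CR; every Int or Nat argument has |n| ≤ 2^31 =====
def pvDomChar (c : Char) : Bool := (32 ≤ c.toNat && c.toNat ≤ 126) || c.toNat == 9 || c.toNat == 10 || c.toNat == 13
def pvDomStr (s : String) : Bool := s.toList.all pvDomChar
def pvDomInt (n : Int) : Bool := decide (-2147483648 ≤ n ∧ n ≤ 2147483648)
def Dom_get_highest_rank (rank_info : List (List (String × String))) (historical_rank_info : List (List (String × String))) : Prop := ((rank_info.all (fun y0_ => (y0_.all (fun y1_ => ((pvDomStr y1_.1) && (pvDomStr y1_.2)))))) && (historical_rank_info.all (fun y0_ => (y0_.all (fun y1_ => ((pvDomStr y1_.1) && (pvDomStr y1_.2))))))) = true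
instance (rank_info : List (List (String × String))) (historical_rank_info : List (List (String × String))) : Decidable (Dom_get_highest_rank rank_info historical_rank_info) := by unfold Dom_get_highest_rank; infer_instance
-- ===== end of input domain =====

-- B collects the set of (tier, division) pairs among solo-queue entries and walks the fixed
-- 40-cell rank ladder top-down, returning the first present cell, instead of A's running-maximum
-- accumulator scan; same return value on Pre_, not faster.

-- ===== PORT A =====
-- rank_entry['k'] / .get('k') on a Python dict passed as an association list
def entryGet (e : List (String × String)) (k : String) : Option String :=
  PySem.Dict.get? (PySem.Dict.mk e) k

-- RANK_ORDER[t]: the fall-through 0 is Python's KeyError, excluded by Pre_get_highest_rank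
def rankOrder : Option String → Int
  | some "IRON" => 1
  | some "BRONZE" => 2
  | some "SILVER" => 3
  | some "GOLD" => 4
  | some "PLATINUM" => 5
  | some "EMERALD" => 6
  | some "DIAMOND" => 7
  | some "MASTER" => 8
  | some "GRANDMASTER" => 9
  | some "CHALLENGER" => 10
  | _ => 0

-- DIVISION_ORDER[d]: the fall-through -1 is Python's KeyError, excluded by Pre_get_highest_rank
def divisionOrder : Option String → Int
  | some "IV" => 0
  | some "III" => 10
  | some "II" => 20
  | some "I" => 30
  | _ => -1

def get_highest_rank (rank_info : List (List (String × String))) (historical_rank_info : List (List (String × String))) : Option String × Option String :=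
  rank_info.foldl (fun st rank_entry =>
    if entryGet rank_entry "queue_type" == some "RANKED_SOLO_5x5" then
      let rank := entryGet rank_entry "tier"
      let division := entryGet rank_entry "division"
      if st.1 = none ∨ rankOrder rank > rankOrder st.1 ∨ (rankOrder rank = rankOrder st.1 ∧ divisionOrder division > divisionOrder st.2) then
        (rank, division)
      else st
    else st) (none, none)

-- ===== PORT B =====
def tierLadder : List String :=
  ["CHALLENGER", "GRANDMASTER", "MASTER", "DIAMOND", "EMERALD",
   "PLATINUM", "GOLD", "SILVER", "BRONZE", "IRON"]

def divisionLadder : List String := ["I", "II", "III", "IV"]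

-- the nested for-loops with early return = find? over the ladder cells in loop order
def get_highest_rank_alt (rank_info : List (List (String × String))) (historical_rank_info : List (List (String × String))) : Option String × Option String :=
  let present : PySem.Set (Option String × Option String) :=
    PySem.Set.ofList ((rank_info.filter (fun e => entryGet e "queue_type" == some "RANKED_SOLO_5x5")).map
      (fun e => (entryGet e "tier", entryGet e "division")))
  match (tierLadder.flatMap (fun t => divisionLadder.map (fun d => (t, d)))).find?
      (fun td => PySem.Set.contains present (some td.1, some td.2)) with
  | some td => (some td.1, some td.2)
  | none => (none, none)

-- ===== PRECONDITION & SPEC =====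
def tierOk (e : List (String × String)) : Bool :=
  match entryGet e "tier" with
  | some t => ["IRON","BRONZE","SILVER","GOLD","PLATINUM","EMERALD","DIAMOND","MASTER","GRANDMASTER","CHALLENGER"].contains t
  | none => false

def divOk (e : List (String × String)) : Bool :=
  match entryGet e "division" with
  | some d => ["IV","III","II","I"].contains d
  | none => false

-- Pre_ excludes entries without a 'queue_type' key (A raises KeyError) and solo-queue entries
-- whose tier/division are not valid RANK_ORDER/DIVISION_ORDER keys: there A usually raises
-- KeyError too, except when short-circuit evaluation skips the dict lookup (first entry, or a
-- strictly greater tier), an artefact on which B instead returns (None, None).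
def Pre_get_highest_rank (rank_info : List (List (String × String))) (historical_rank_info : List (List (String × String))) : Prop :=
  ∀ e ∈ rank_info, (entryGet e "queue_type").isSome ∧
    (entryGet e "queue_type" = some "RANKED_SOLO_5x5" → tierOk e ∧ divOk e)
instance (rank_info : List (List (String × String))) (historical_rank_info : List (List (String × String))) : Decidable (Pre_get_highest_rank rank_info historical_rank_info) := by unfold Pre_get_highest_rank; infer_instance

def pvWitness_get_highest_rank : (List (List (String × String))) × (List (List (String × String))) :=
  ([[("queue_type","RANKED_SOLO_5x5"),("tier","GOLD"),("division","II")],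
    [("queue_type","RANKED_FLEX_SR"),("tier","oops"),("division","?")]], [])

def Spec_get_highest_rank (rank_info : List (List (String × String))) (historical_rank_info : List (List (String × String))) (out : Option String × Option String) : Prop := out = get_highest_rank_alt rank_info historical_rank_info
instance (rank_info : List (List (String × String))) (historical_rank_info : List (List (String × String))) (out : Option String × Option String) : Decidable (Spec_get_highest_rank rank_info historical_rank_info out) := by unfold Spec_get_highest_rank; infer_instance

-- ===== CLAIM (what is proved, stated in full; the proofs are below) =====
def Claim_equal_get_highest_rank : Prop := ∀ (rank_info : List (List (String × String))) (historical_rank_info : List (List (String × String))), Dom_get_highest_rank rank_info historical_rank_info → Pre_get_highest_rank rank_info historical_rank_info → Spec_get_highest_rank rank_info historical_rank_info (get_highest_rank rank_info historical_rank_info)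

-- ===== LEMMAS AND PROOFS =====

-- score of a ladder cell / of a solo entry
def cellScore (td : String × String) : Int :=
  rankOrder (some td.1) * 100 + divisionOrder (some td.2)

def soloScore (e : List (String × String)) : Int :=
  rankOrder (entryGet e "tier") * 100 + divisionOrder (entryGet e "division")

def ladder : List (String × String) :=
  tierLadder.flatMap (fun t => divisionLadder.map (fun d => (t, d)))

theorem tierOk_elim (e : List (String × String)) (h : tierOk e = true) :
    ∃ t, entryGet e "tier" = some t ∧ t ∈ tierLadder := by
  unfold tierOk at h
  cases hg : entryGet e "tier" with
  | none => rw [hg] at h; simp at h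
  | some t =>
      refine ⟨t, rfl, ?_⟩
      rw [hg] at h
      simp [List.contains_eq_mem] at h
      rcases h with rfl|rfl|rfl|rfl|rfl|rfl|rfl|rfl|rfl|rfl <;> simp [tierLadder]

theorem divOk_elim (e : List (String × String)) (h : divOk e = true) :
    ∃ d, entryGet e "division" = some d ∧ d ∈ divisionLadder := by
  unfold divOk at h
  cases hg : entryGet e "division" with
  | none => rw [hg] at h; simp at h
  | some d =>
      refine ⟨d, rfl, ?_⟩
      rw [hg] at h
      simp [List.contains_eq_mem] at h
      rcases h with rfl|rfl|rfl|rfl <;> simp [divisionLadder]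

theorem tierOk_isSome (e : List (String × String)) (h : tierOk e = true) :
    (entryGet e "tier").isSome := by
  obtain ⟨t, ht, _⟩ := tierOk_elim e h
  simp [ht]

-- valid scores are bounded below 100 (used to show A's accumulator condition = score comparison)
theorem score_bounds (e : List (String × String)) (h1 : tierOk e = true) (h2 : divOk e = true) :
    (1 ≤ rankOrder (entryGet e "tier") ∧ rankOrder (entryGet e "tier") ≤ 10) ∧
    (0 ≤ divisionOrder (entryGet e "division") ∧ divisionOrder (entryGet e "division") ≤ 30) := by
  obtain ⟨t, ht, htm⟩ := tierOk_elim e h1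
  obtain ⟨d, hd, hdm⟩ := divOk_elim e h2
  rw [ht, hd]
  constructor
  · fin_cases htm <;> simp [rankOrder]
  · fin_cases hdm <;> simp [divisionOrder]

-- the projection relating a best-entry accumulator to A's (tier, division) accumulator
def projAcc : Option (List (String × String)) → Option String × Option String
  | none => (none, none)
  | some m => (entryGet m "tier", entryGet m "division")

def stepA (st : Option String × Option String) (rank_entry : List (String × String)) : Option String × Option String :=
  let rank := entryGet rank_entry "tier"
  let division := entryGet rank_entry "division"
  if st.1 = none ∨ rankOrder rank > rankOrder st.1 ∨ (rankOrder rank = rankOrder st.1 ∧ divisionOrder division > divisionOrder st.2) then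
    (rank, division)
  else st

theorem fold_proj (l : List (List (String × String)))
    (hl : ∀ e ∈ l, tierOk e = true ∧ divOk e = true) :
    ∀ acc : Option (List (String × String)), (∀ m, acc = some m → tierOk m = true ∧ divOk m = true) →
    l.foldl stepA (projAcc acc)
      = projAcc (l.foldl (fun acc x => match acc with
          | none => some x
          | some m => if soloScore m < soloScore x then some x else some m) acc) := by
  induction l with
  | nil => intro acc _; rfl
  | cons e t ih =>
      intro acc hacc
      have he : tierOk e = true ∧ divOk e = true := hl e (by simp)
      have ht : ∀ x ∈ t, tierOk x = true ∧ divOk x = true := fun x hx => hl x (by simp [hx])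
      simp only [List.foldl_cons]
      cases acc with
      | none =>
          have hstep : stepA (projAcc none) e = projAcc (some e) := by
            simp [stepA, projAcc]
          rw [hstep]
          exact ih ht (some e) (fun m hm => by cases hm; exact he)
      | some m =>
          have hm : tierOk m = true ∧ divOk m = true := hacc m rfl
          have hms : (entryGet m "tier").isSome := tierOk_isSome m hm.1
          have hbm := score_bounds m hm.1 hm.2
          have hbe := score_bounds e he.1 he.2
          have hstep : stepA (projAcc (some m)) e
              = projAcc (if soloScore m < soloScore e then some e else some m) := by
            simp only [stepA, projAcc, soloScore]
            have h1 : ¬ (entryGet m "tier" = none) := by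
              cases hg : entryGet m "tier" with
              | none => rw [hg] at hms; simp at hms
              | some t => simp
            by_cases hlt : rankOrder (entryGet m "tier") * 100 + divisionOrder (entryGet m "division")
                < rankOrder (entryGet e "tier") * 100 + divisionOrder (entryGet e "division")
            · have hcond : rankOrder (entryGet e "tier") > rankOrder (entryGet m "tier")
                  ∨ (rankOrder (entryGet e "tier") = rankOrder (entryGet m "tier")
                     ∧ divisionOrder (entryGet e "division") > divisionOrder (entryGet m "division")) := by omega
              rw [if_pos (by tauto), if_pos hlt]
            · have hcond : ¬ (rankOrder (entryGet e "tier") > rankOrder (entryGet m "tier")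
                  ∨ (rankOrder (entryGet e "tier") = rankOrder (entryGet m "tier")
                     ∧ divisionOrder (entryGet e "division") > divisionOrder (entryGet m "division"))) := by omega
              rw [if_neg (by tauto), if_neg hlt]
          rw [hstep]
          have hacc' : ∀ x, (if soloScore m < soloScore e then some e else some m) = some x →
              tierOk x = true ∧ divOk x = true := by
            intro x hx
            split at hx <;> cases hx
            · exact he
            · exact hm
          exact ih ht (if soloScore m < soloScore e then some e else some m) hacc'

-- the ladder is strictly decreasing in score
theorem ladder_pairwise : ladder.Pairwise (fun a b => cellScore b < cellScore a) := by
  decide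

-- find? on a strictly-decreasing list returns a present element of maximal score
theorem find?_of_pairwise (L : List (String × String)) (p : String × String → Bool)
    (x : String × String)
    (hpw : L.Pairwise (fun a b => cellScore b < cellScore a))
    (hx : x ∈ L) (hpx : p x = true)
    (hmax : ∀ y ∈ L, p y = true → cellScore y ≤ cellScore x) :
    L.find? p = some x := by
  induction L with
  | nil => cases hx
  | cons h t ih =>
      rcases List.mem_cons.1 hx with rfl | hxt
      · simp [List.find?, hpx]
      · have hlt : cellScore x < cellScore h :=
          (List.pairwise_cons.1 hpw).1 x hxt
        have hph : p h = false := by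
          by_contra hc
          have : cellScore h ≤ cellScore x := hmax h (by simp) (by simpa using hc)
          omega
        simp only [List.find?, hph]
        exact ih (List.pairwise_cons.1 hpw).2 hxt
          (fun y hy hpy => hmax y (by simp [hy]) hpy)

-- ===== VERDICT (by name: the statement is the Claim_ definition above) =====
theorem get_highest_rank_spec : Claim_equal_get_highest_rank := by
  intro rank_info historical_rank_info _ hpre
  unfold Spec_get_highest_rank
  -- A as a fold over the filtered solo entries, then as a projection of the first-maximal entry
  have hA : get_highest_rank rank_info historical_rank_info
      = rank_info.foldl (fun st e => if (entryGet e "queue_type" == some "RANKED_SOLO_5x5") = true then stepA st e else st) (none, none) := rfl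
  rw [hA, PySem.List.foldl_if_eq_foldl_filter]
  set S := rank_info.filter (fun e => entryGet e "queue_type" == some "RANKED_SOLO_5x5") with hS
  have hsolo : ∀ e ∈ S, tierOk e = true ∧ divOk e = true := by
    intro e he
    rw [hS, List.mem_filter] at he
    exact (hpre e he.1).2 (by simpa using he.2)
  have hfold := fold_proj S hsolo none (by intro m hm; cases hm)
  simp only [projAcc] at hfold
  rw [hfold]
  have hmax : PySem.List.max? S soloScore
      = S.foldl (fun acc x => match acc with
          | none => some x
          | some m => if soloScore m < soloScore x then some x else some m) none := by
    simp only [PySem.List.max?]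
    congr 1
    funext acc x
    cases acc <;> rfl
  rw [← hmax]
  have hB : get_highest_rank_alt rank_info historical_rank_info
      = (match ladder.find? (fun td => PySem.Set.contains
            (PySem.Set.ofList ((rank_info.filter (fun e => entryGet e "queue_type" == some "RANKED_SOLO_5x5")).map
              (fun e => (entryGet e "tier", entryGet e "division")))) (some td.1, some td.2)) with
        | some td => (some td.1, some td.2)
        | none => ((none : Option String), (none : Option String))) := rfl
  rw [hB, ← hS]
  cases hm : PySem.List.max? S soloScore with
  | none =>
      have hSnil : S = [] := (PySem.List.max?_eq_none_iff S soloScore).1 hm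
      rw [hSnil]
      decide
  | some best =>
      have hbestS : best ∈ S := PySem.List.max?_mem hm
      have hb := hsolo best hbestS
      obtain ⟨t0, ht0, ht0m⟩ := tierOk_elim best hb.1
      obtain ⟨d0, hd0, hd0m⟩ := divOk_elim best hb.2
      have hmem_present : ∀ td : String × String,
          (PySem.Set.contains (PySem.Set.ofList (S.map (fun e => (entryGet e "tier", entryGet e "division"))))
            (some td.1, some td.2)) = true
          ↔ ∃ e ∈ S, entryGet e "tier" = some td.1 ∧ entryGet e "division" = some td.2 := by
        intro td
        rw [PySem.Set.contains_iff, PySem.Set.mem_ofList, List.mem_map]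
        constructor
        · rintro ⟨e, he, heq⟩
          exact ⟨e, he, by injection heq with a b; exact ⟨a, b⟩⟩
        · rintro ⟨e, he, h1, h2⟩
          exact ⟨e, he, by rw [h1, h2]⟩
      have hfind : ladder.find?
          (fun td => PySem.Set.contains (PySem.Set.ofList (S.map (fun e => (entryGet e "tier", entryGet e "division")))) (some td.1, some td.2))
          = some (t0, d0) := by
        apply find?_of_pairwise _ _ _ ladder_pairwise
        · exact List.mem_flatMap.2 ⟨t0, ht0m, List.mem_map.2 ⟨d0, hd0m, rfl⟩⟩
        · exact (hmem_present (t0, d0)).2 ⟨best, hbestS, ht0, hd0⟩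
        · intro y hy hpy
          obtain ⟨e, he, h1, h2⟩ := (hmem_present y).1 hpy
          have hle : soloScore e ≤ soloScore best := PySem.List.max?_isMax hm e he
          simp only [soloScore, cellScore, h1, h2, ht0, hd0] at *
          exact hle
      rw [hfind]
      simp [ht0, hd0]
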